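-- pv_equiv track=rewrite | github.com/bavalpey/codefights | graphs/kingdomRoads/livingOnTheRoads.py | livingOnTheRoads
-- ===== SOURCE A (Python) =====
-- from collections import OrderedDict
--
-- def livingOnTheRoads(roadRegister):
--     road_dict = OrderedDict()
--     for orig,roads in enumerate(roadRegister[:-1]):
--         for city,road_to in enumerate(roads):
--             if orig != city:
--                 if road_to:
--                     key = ''.join(str(i) for i in sorted([orig,city]))
--                     road_dict[key] = sorted([orig,city])
--     ans = []
--     for j in road_dict:
--         for i in road_dict[j]:
--             this = []
--             for k in road_dict:
--                 if j == k:
--                     this.append(False)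
--                 elif set(road_dict[j])&set(road_dict[k]): # is there a common city from each road
--                     this.append(True)
--                 else:
--                     this.append(False)
--         ans.append(this)
--     return ans
-- ===== SOURCE B (Python) =====
-- def livingOnTheRoads(roadRegister):
--     # edge list: same order/dedup as A (keyed by the joined decimal string)
--     edges = {}
--     for orig, roads in enumerate(roadRegister[:-1]):
--         for city, road_to in enumerate(roads):
--             if orig != city and road_to:
--                 lo, hi = (orig, city) if orig < city else (city, orig)
--                 edges[str(lo) + str(hi)] = (lo, hi)
--     edge_list = list(edges.values())
--     n = len(edge_list)
--     # vertex -> indices of edges touching it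
--     incs = []
--     for idx, (a, b) in enumerate(edge_list):
--         incs.append((a, idx))
--         incs.append((b, idx))
--     buckets = {}
--     for v, idx in incs:
--         buckets.setdefault(v, []).append(idx)
--     # mark neighbours of each edge directly, no per-cell intersection scan
--     ans = []
--     for x, (a, b) in enumerate(edge_list):
--         row = [False] * n
--         for y in buckets[a] + buckets[b]:
--             if y != x:
--                 row[y] = True
--         ans.append(row)
--     return ans
-- ===== Notes on version B (the rewrite author's own statement) =====
-- stated objective: faster
-- what changed: Replaces A's per-cell set-intersection scan (and its doubled row rebuild) by a one-pass vertex-to-edge-index bucket table: each row starts all-False and only the neighbouring edge indices found in the two endpoint buckets are marked True.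
import Mathlib
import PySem

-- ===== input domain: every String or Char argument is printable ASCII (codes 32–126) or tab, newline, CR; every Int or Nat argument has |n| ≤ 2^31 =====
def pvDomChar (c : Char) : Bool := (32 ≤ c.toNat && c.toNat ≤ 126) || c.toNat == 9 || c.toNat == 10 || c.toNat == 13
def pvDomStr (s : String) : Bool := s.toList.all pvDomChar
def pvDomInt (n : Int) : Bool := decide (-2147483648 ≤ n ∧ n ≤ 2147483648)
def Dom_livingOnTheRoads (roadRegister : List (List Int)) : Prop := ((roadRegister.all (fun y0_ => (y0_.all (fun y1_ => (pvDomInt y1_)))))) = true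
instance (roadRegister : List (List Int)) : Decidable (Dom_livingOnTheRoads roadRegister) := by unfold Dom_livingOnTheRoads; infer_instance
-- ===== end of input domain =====

-- B replaces A's per-cell set-intersection scan (the row being rebuilt once per endpoint) by a
-- vertex→edge-index bucket table and marks each edge's neighbours directly in an all-False row.

-- ===== PORT A =====
-- truthiness of set(road_dict[j]) & set(road_dict[k])
def lotrShare (vj vk : List Int) : Bool :=
  !(PySem.Set.inter (PySem.Set.ofList vj) (PySem.Set.ofList vk) == [])

-- the OrderedDict build loop of A (key = ''.join(str(i) for i in sorted([orig,city])))
def lotrDict (roadRegister : List (List Int)) : PySem.Dict String (List Int) :=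
  (PySem.List.enumerate (PySem.List.slice roadRegister none (some (-1)))).foldl
    (fun d p =>
      (PySem.List.enumerate p.2).foldl
        (fun d q =>
          if p.1 ≠ q.1 then
            if q.2 ≠ 0 then
              d.insert (PySem.Str.join ""
                  ((PySem.List.sorted [p.1, q.1] (fun i => i) false).map PySem.Int.toStr))
                (PySem.List.sorted [p.1, q.1] (fun i => i) false)
            else d
          else d)
        d)
    PySem.Dict.empty

-- the inner 'for k in road_dict' loop building `this`
def lotrRow (d : PySem.Dict String (List Int)) (j : String) : List Bool :=
  d.keys.foldl
    (fun acc k =>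
      if j = k then acc ++ [false]
      else if lotrShare (d.getD j []) (d.getD k []) then acc ++ [true]
      else acc ++ [false])
    []

def livingOnTheRoads (roadRegister : List (List Int)) : List (List Bool) :=
  let road_dict := lotrDict roadRegister
  -- the `this` variable persists across iterations of j (Python leftover-state semantics)
  (road_dict.keys.foldl
    (fun (st : List (List Bool) × List Bool) j =>
      let this := (road_dict.getD j []).foldl
        (fun (_ : List Bool) _ => lotrRow road_dict j) st.2
      (st.1 ++ [this], this))
    ([], [])).1

-- ===== PORT B =====
-- same dedup dict, values kept as ordered pairs (lo, hi)
def lotrEdges (roadRegister : List (List Int)) : PySem.Dict String (Int × Int) :=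
  (PySem.List.enumerate (PySem.List.slice roadRegister none (some (-1)))).foldl
    (fun d p =>
      (PySem.List.enumerate p.2).foldl
        (fun d q =>
          if p.1 ≠ q.1 ∧ q.2 ≠ 0 then
            d.insert (PySem.Int.toStr (if p.1 < q.1 then p.1 else q.1) ++
                      PySem.Int.toStr (if p.1 < q.1 then q.1 else p.1))
              (if p.1 < q.1 then p.1 else q.1, if p.1 < q.1 then q.1 else p.1)
          else d)
        d)
    PySem.Dict.empty

-- incidence pairs (vertex, edge index)
def lotrIncs (edgeList : List (Int × Int)) : List (Int × Int) :=
  (PySem.List.enumerate edgeList).foldl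
    (fun l p => (l ++ [(p.2.1, p.1)]) ++ [(p.2.2, p.1)]) []

-- buckets[v].append(idx) via setdefault
def lotrBuckets (incs : List (Int × Int)) : PySem.Dict Int (List Int) :=
  incs.foldl (fun d q => d.modify q.1 [] (fun xs => xs ++ [q.2])) PySem.Dict.empty

def livingOnTheRoads_alt (roadRegister : List (List Int)) : List (List Bool) :=
  let edgeList := (lotrEdges roadRegister).values
  let n := edgeList.length
  let buckets := lotrBuckets (lotrIncs edgeList)
  -- buckets[a]/buckets[b]: the key is always present (edge x itself lies in both buckets)
  (PySem.List.enumerate edgeList).foldl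
    (fun ans p =>
      ans ++ [((buckets.getD p.2.1 []) ++ (buckets.getD p.2.2 [])).foldl
        (fun row y => if y ≠ p.1 then PySem.List.pySetD row y true else row)
        (List.replicate n false)])
    []

-- ===== PRECONDITION & SPEC =====
def Spec_livingOnTheRoads (roadRegister : List (List Int)) (out : List (List Bool)) : Prop := out = livingOnTheRoads_alt roadRegister
instance (roadRegister : List (List Int)) (out : List (List Bool)) : Decidable (Spec_livingOnTheRoads roadRegister out) := by unfold Spec_livingOnTheRoads; infer_instance

-- ===== CLAIM (what is proved, stated in full; the proofs are below) =====
def Claim_equal_livingOnTheRoads : Prop := ∀ (roadRegister : List (List Int)), Dom_livingOnTheRoads roadRegister → Spec_livingOnTheRoads roadRegister (livingOnTheRoads roadRegister)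

-- ===== LEMMAS AND PROOFS =====

-- value shape seen from port A's side: (k, (a, b)) becomes (k, [a, b])
def lotrG : String × (Int × Int) → String × List Int := fun p => (p.1, [p.2.1, p.2.2])

theorem lotr_sorted_pair (x y : Int) :
    PySem.List.sorted [x, y] (fun i => i) false = if y < x then [y, x] else [x, y] := by
  simp [PySem.List.sorted, PySem.List.insertBy]

theorem lotr_join_pair (a b : String) : PySem.Str.join "" [a, b] = a ++ b := by
  simp [PySem.Str.join, PySem.Chars.join, List.intercalate]

theorem lotr_rel_insert (dB : PySem.Dict String (Int × Int)) (k : String) (a b : Int) :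
    PySem.Dict.mk ((dB.insert k (a, b)).items.map lotrG)
      = (PySem.Dict.mk (dB.items.map lotrG)).insert k [a, b] := by
  have hc : (PySem.Dict.mk (dB.items.map lotrG)).contains k = dB.contains k := by
    simp [PySem.Dict.contains_eq_decide_mem_keys, PySem.Dict.keys, lotrG, Function.comp]
  apply PySem.Dict.ext
  by_cases h : dB.contains k = true
  · rw [PySem.Dict.items_insert_of_contains _ _ h]
    simp only [PySem.Dict.items]
    rw [PySem.Dict.items_insert_of_contains _ _ (hc.trans h)]
    rw [List.map_map, List.map_map]
    apply List.map_congr_left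
    intro p _
    by_cases hp : p.1 = k <;> simp [lotrG, Function.comp, hp]
  · rw [PySem.Dict.items_insert_of_not_contains _ _ (by simpa using h)]
    simp only [PySem.Dict.items]
    rw [PySem.Dict.items_insert_of_not_contains _ _ (by rw [hc]; simpa using h)]
    simp [lotrG]

theorem lotr_dict_rel_inner (o : Int) (Q : List (Int × Int))
    (dA : PySem.Dict String (List Int)) (dB : PySem.Dict String (Int × Int))
    (hrel : dA = PySem.Dict.mk (dB.items.map lotrG)) :
    Q.foldl
      (fun d q =>
        if o ≠ q.1 then
          if q.2 ≠ 0 then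
            d.insert (PySem.Str.join ""
                ((PySem.List.sorted [o, q.1] (fun i => i) false).map PySem.Int.toStr))
              (PySem.List.sorted [o, q.1] (fun i => i) false)
          else d
        else d) dA
      = PySem.Dict.mk ((Q.foldl
          (fun d q =>
            if o ≠ q.1 ∧ q.2 ≠ 0 then
              d.insert (PySem.Int.toStr (if o < q.1 then o else q.1) ++
                        PySem.Int.toStr (if o < q.1 then q.1 else o))
                (if o < q.1 then o else q.1, if o < q.1 then q.1 else o)
            else d) dB).items.map lotrG) := by
  induction Q generalizing dA dB with
  | nil => simpa using hrel
  | cons q Q ih =>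
    simp only [List.foldl_cons]
    apply ih
    subst hrel
    by_cases h1 : o ≠ q.1
    · by_cases h2 : q.2 ≠ 0
      · rw [if_pos h1, if_pos h2, if_pos ⟨h1, h2⟩, lotr_sorted_pair]
        by_cases ho : o < q.1
        · rw [if_neg (by omega), if_pos ho]
          simp only [List.map_cons, List.map_nil]
          rw [lotr_join_pair]
          simp only [if_pos ho]
          exact (lotr_rel_insert ..).symm
        · rw [if_pos (by omega), if_neg ho]
          simp only [List.map_cons, List.map_nil]
          rw [lotr_join_pair]
          simp only [if_neg ho]
          exact (lotr_rel_insert ..).symm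
      · rw [if_pos h1, if_neg h2, if_neg (by tauto)]
    · rw [if_neg h1, if_neg (by tauto)]

theorem lotr_dict_rel_outer (L : List (Int × List Int))
    (dA : PySem.Dict String (List Int)) (dB : PySem.Dict String (Int × Int))
    (hrel : dA = PySem.Dict.mk (dB.items.map lotrG)) :
    L.foldl
      (fun d p =>
        (PySem.List.enumerate p.2).foldl
          (fun d q =>
            if p.1 ≠ q.1 then
              if q.2 ≠ 0 then
                d.insert (PySem.Str.join ""
                    ((PySem.List.sorted [p.1, q.1] (fun i => i) false).map PySem.Int.toStr))
                  (PySem.List.sorted [p.1, q.1] (fun i => i) false)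
              else d
            else d)
          d) dA
      = PySem.Dict.mk ((L.foldl
          (fun d p =>
            (PySem.List.enumerate p.2).foldl
              (fun d q =>
                if p.1 ≠ q.1 ∧ q.2 ≠ 0 then
                  d.insert (PySem.Int.toStr (if p.1 < q.1 then p.1 else q.1) ++
                            PySem.Int.toStr (if p.1 < q.1 then q.1 else p.1))
                    (if p.1 < q.1 then p.1 else q.1, if p.1 < q.1 then q.1 else p.1)
                else d)
              d) dB).items.map lotrG) := by
  induction L generalizing dA dB with
  | nil => simpa using hrel
  | cons p L ih =>
    simp only [List.foldl_cons]
    exact ih _ _ (lotr_dict_rel_inner p.1 _ _ _ hrel)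

theorem lotr_dict_rel (roadRegister : List (List Int)) :
    lotrDict roadRegister = PySem.Dict.mk ((lotrEdges roadRegister).items.map lotrG) := by
  unfold lotrDict lotrEdges
  exact lotr_dict_rel_outer _ _ _ rfl

theorem lotr_edges_inv_inner (o : Int) (Q : List (Int × Int))
    (dB : PySem.Dict String (Int × Int))
    (h : dB.keys.Nodup ∧ ∀ p ∈ dB.items, p.2.1 < p.2.2) :
    (Q.foldl
      (fun d q =>
        if o ≠ q.1 ∧ q.2 ≠ 0 then
          d.insert (PySem.Int.toStr (if o < q.1 then o else q.1) ++
                    PySem.Int.toStr (if o < q.1 then q.1 else o))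
            (if o < q.1 then o else q.1, if o < q.1 then q.1 else o)
        else d) dB).keys.Nodup ∧
      ∀ p ∈ (Q.foldl
        (fun d q =>
          if o ≠ q.1 ∧ q.2 ≠ 0 then
            d.insert (PySem.Int.toStr (if o < q.1 then o else q.1) ++
                      PySem.Int.toStr (if o < q.1 then q.1 else o))
              (if o < q.1 then o else q.1, if o < q.1 then q.1 else o)
          else d) dB).items, p.2.1 < p.2.2 := by
  induction Q generalizing dB with
  | nil => simpa using h
  | cons q Q ih =>
    simp only [List.foldl_cons]
    apply ih
    by_cases hc : o ≠ q.1 ∧ q.2 ≠ 0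
    · rw [if_pos hc]
      refine ⟨PySem.Dict.nodup_keys_insert _ _ _ h.1, ?_⟩
      intro p hp
      rcases (PySem.Dict.mem_items_insert _ _ _ _).1 hp with heq | ⟨hp', _⟩
      · rcases hc with ⟨h1, _⟩
        subst heq
        by_cases ho : o < q.1 <;> simp [ho] <;> omega
      · exact h.2 p hp'
    · rw [if_neg hc]; exact h

theorem lotr_edges_inv_outer (L : List (Int × List Int))
    (dB : PySem.Dict String (Int × Int))
    (h : dB.keys.Nodup ∧ ∀ p ∈ dB.items, p.2.1 < p.2.2) :
    (L.foldl
      (fun d p =>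
        (PySem.List.enumerate p.2).foldl
          (fun d q =>
            if p.1 ≠ q.1 ∧ q.2 ≠ 0 then
              d.insert (PySem.Int.toStr (if p.1 < q.1 then p.1 else q.1) ++
                        PySem.Int.toStr (if p.1 < q.1 then q.1 else p.1))
                (if p.1 < q.1 then p.1 else q.1, if p.1 < q.1 then q.1 else p.1)
            else d)
          d) dB).keys.Nodup ∧
      ∀ p ∈ (L.foldl
        (fun d p =>
          (PySem.List.enumerate p.2).foldl
            (fun d q =>
              if p.1 ≠ q.1 ∧ q.2 ≠ 0 then
                d.insert (PySem.Int.toStr (if p.1 < q.1 then p.1 else q.1) ++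
                          PySem.Int.toStr (if p.1 < q.1 then q.1 else p.1))
                  (if p.1 < q.1 then p.1 else q.1, if p.1 < q.1 then q.1 else p.1)
              else d)
            d) dB).items, p.2.1 < p.2.2 := by
  induction L generalizing dB with
  | nil => simpa using h
  | cons p L ih =>
    simp only [List.foldl_cons]
    exact ih _ (lotr_edges_inv_inner p.1 _ _ h)

theorem lotr_edges_inv (roadRegister : List (List Int)) :
    (lotrEdges roadRegister).keys.Nodup ∧
      ∀ p ∈ (lotrEdges roadRegister).items, p.2.1 < p.2.2 := by
  unfold lotrEdges
  exact lotr_edges_inv_outer _ _ ⟨PySem.Dict.nodup_keys_empty, by simp [PySem.Dict.empty]⟩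

theorem lotr_foldl_const' {α β : Type} (c : β) (l : List α) :
    l.foldl (fun _ _ => c) c = c := by
  induction l with
  | nil => rfl
  | cons x xs ih => simpa using ih

theorem lotr_foldl_const {α β : Type} (c init : β) (l : List α) (h : l ≠ []) :
    l.foldl (fun _ _ => c) init = c := by
  cases l with
  | nil => exact absurd rfl h
  | cons x xs => simpa using lotr_foldl_const' c xs

theorem lotr_row_eq_map (d : PySem.Dict String (List Int)) (j : String) :
    lotrRow d j = d.keys.map (fun k =>
      if j = k then false else lotrShare (d.getD j []) (d.getD k [])) := by
  unfold lotrRow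
  have hstep : (fun (acc : List Bool) k =>
      if j = k then acc ++ [false]
      else if lotrShare (d.getD j []) (d.getD k []) then acc ++ [true]
      else acc ++ [false])
      = fun (acc : List Bool) k =>
        acc ++ [if j = k then false else lotrShare (d.getD j []) (d.getD k [])] := by
    funext acc k
    split_ifs <;> simp_all
  rw [hstep, PySem.List.foldl_append_singleton_eq_map]
  simp

theorem lotr_phase2 (d : PySem.Dict String (List Int))
    (h : ∀ j ∈ d.keys, d.getD j [] ≠ []) :
    (d.keys.foldl
      (fun (st : List (List Bool) × List Bool) j =>
        let this := (d.getD j []).foldl (fun (_ : List Bool) _ => lotrRow d j) st.2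
        (st.1 ++ [this], this)) ([], [])).1
      = d.keys.map (fun j => lotrRow d j) := by
  suffices haux : ∀ (ks : List String) (st : List (List Bool) × List Bool),
      (∀ j ∈ ks, d.getD j [] ≠ []) →
      (ks.foldl
        (fun (st : List (List Bool) × List Bool) j =>
          let this := (d.getD j []).foldl (fun (_ : List Bool) _ => lotrRow d j) st.2
          (st.1 ++ [this], this)) st).1
        = st.1 ++ ks.map (fun j => lotrRow d j) by
    simpa using haux d.keys ([], []) h
  intro ks
  induction ks with
  | nil => intro st _; simp
  | cons j ks ih =>
    intro st hks
    simp only [List.foldl_cons, List.map_cons]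
    rw [lotr_foldl_const _ _ _ (hks j (List.mem_cons_self ..)),
      ih _ (fun x hx => hks x (List.mem_cons_of_mem _ hx))]
    simp

theorem lotr_share_iff (a b c d : Int) :
    lotrShare [a, b] [c, d] = decide ((a = c ∨ a = d) ∨ b = c ∨ b = d) := by
  simp only [lotrShare, PySem.Set.inter, PySem.Set.ofList, PySem.Set.contains, PySem.Set.empty]
  by_cases h1 : a = c <;> by_cases h2 : a = d <;> by_cases h3 : b = c <;> by_cases h4 : b = d <;>
    simp_all

theorem lotr_pySetD_nonneg (row : List Bool) (y : Int) (v : Bool) (hy : 0 ≤ y) :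
    PySem.List.pySetD row y v = if y.toNat < row.length then row.set y.toNat v else row := by
  simp only [PySem.List.pySetD, PySem.List.pySet?, PySem.List.pyIdx?]
  split_ifs with h1 h2 <;> simp_all <;> omega

theorem lotr_pySetD_length {α : Type} (xs : List α) (i : Int) (v : α) :
    (PySem.List.pySetD xs i v).length = xs.length := by
  simp only [PySem.List.pySetD, PySem.List.pySet?]
  cases h : PySem.List.pyIdx? xs.length i <;> simp

theorem lotr_mark_length (l : List Int) (P : Int → Bool) (row0 : List Bool) :
    (l.foldl (fun row y => if P y then PySem.List.pySetD row y true else row) row0).length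
      = row0.length := by
  induction l generalizing row0 with
  | nil => rfl
  | cons y l ih =>
    simp only [List.foldl_cons]
    rw [ih]
    by_cases hP : P y <;> simp [hP, lotr_pySetD_length]

theorem lotr_mark_getElem? (l : List Int) (P : Int → Bool) (row0 : List Bool)
    (h : ∀ y ∈ l, 0 ≤ y) (i : Nat) :
    (l.foldl (fun row y => if P y then PySem.List.pySetD row y true else row) row0)[i]?
      = (row0[i]?).map (fun b => b || l.any (fun y => P y && y == (i : Int))) := by
  induction l generalizing row0 with
  | nil => cases h' : row0[i]? <;> simp [h']
  | cons y l ih =>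
    have hy := h y (List.mem_cons_self ..)
    simp only [List.foldl_cons, List.any_cons]
    rw [ih _ (fun z hz => h z (List.mem_cons_of_mem _ hz))]
    have hrow1 : (if P y then PySem.List.pySetD row0 y true else row0)[i]?
        = row0[i]?.map (fun b => b || (P y && y == (i : Int))) := by
      by_cases hP : P y
      · rw [if_pos hP, lotr_pySetD_nonneg _ _ _ hy]
        by_cases hyi : y = (i : Int)
        · subst hyi
          have hti : (i : Int).toNat = i := by omega
          by_cases hlen : (i : Int).toNat < row0.length
          · rw [if_pos hlen, hti]
            have hi : i < row0.length := hti ▸ hlen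
            simp [hi, List.getElem?_eq_getElem hi, hP]
          · rw [if_neg hlen]
            have hnone : row0[i]? = none := List.getElem?_eq_none_iff.2 (by omega)
            rw [hnone]
            simp
        · have hti : y.toNat ≠ i := by omega
          have hc : (P y && (y == (i : Int))) = false := by simp [hyi]
          by_cases hlen : y.toNat < row0.length
          · rw [if_pos hlen, List.getElem?_set_ne hti]
            cases hr : row0[i]? <;> simp [hr, hc]
          · rw [if_neg hlen]
            cases hr : row0[i]? <;> simp [hr, hc]
      · have hPf : P y = false := by simpa using hP
        rw [if_neg hP]
        cases row0[i]? <;> simp [hPf]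
    rw [hrow1]
    cases row0[i]? <;> simp [Bool.or_assoc]

theorem lotr_incs_eq (E : List (Int × Int)) :
    lotrIncs E = (PySem.List.enumerate E).flatMap (fun p => [(p.2.1, p.1), (p.2.2, p.1)]) := by
  unfold lotrIncs
  have hstep : (fun (l : List (Int × Int)) (p : Int × (Int × Int)) =>
      (l ++ [(p.2.1, p.1)]) ++ [(p.2.2, p.1)])
      = fun l p => l ++ [(p.2.1, p.1), (p.2.2, p.1)] := by
    funext l p; simp
  rw [hstep, PySem.List.foldl_append_eq_flatMap]
  simp

theorem lotr_bucket_mem (E : List (Int × Int)) (v : Int) (i : Int) :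
    i ∈ (lotrBuckets (lotrIncs E)).getD v []
      ↔ ∃ k : Nat, ∃ _ : k < E.length, (E[k].1 = v ∨ E[k].2 = v) ∧ (k : Int) = i := by
  unfold lotrBuckets
  rw [PySem.Dict.getD_foldl_modify_append, lotr_incs_eq]
  simp only [PySem.Dict.getD_empty, List.nil_append, List.mem_map, List.mem_filter,
    List.mem_flatMap, PySem.List.mem_enumerate_iff]
  constructor
  · rintro ⟨a, ⟨⟨q, ⟨k, hk, rfl⟩, hmem⟩, hv⟩, rfl⟩
    simp only [List.mem_cons, List.not_mem_nil, or_false] at hmem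
    rcases hmem with rfl | rfl
    · exact ⟨k, hk, Or.inl (by simpa using hv), by simp⟩
    · exact ⟨k, hk, Or.inr (by simpa using hv), by simp⟩
  · rintro ⟨k, hk, hor, rfl⟩
    rcases hor with hv | hv
    · exact ⟨(E[k].1, 0 + (k : Int)), ⟨⟨(0 + (k : Int), E[k]), ⟨k, hk, rfl⟩, by simp⟩,
        by simpa using hv⟩, by simp⟩
    · exact ⟨(E[k].2, 0 + (k : Int)), ⟨⟨(0 + (k : Int), E[k]), ⟨k, hk, rfl⟩, by simp⟩,
        by simpa using hv⟩, by simp⟩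

theorem lotr_any_mem (l : List Int) (P : Int → Bool) (i : Int) :
    l.any (fun y => P y && y == i) = (decide (i ∈ l) && P i) := by
  induction l with
  | nil => simp
  | cons x xs ih =>
    by_cases hx : x = i
    · subst hx
      cases hP : P x <;> simp [ih, hP]
    · simp [ih, hx, Ne.symm hx]

-- ===== VERDICT (by name: the statement is the Claim_ definition above) =====
theorem livingOnTheRoads_spec : Claim_equal_livingOnTheRoads := by
  intro rr _
  unfold Spec_livingOnTheRoads livingOnTheRoads livingOnTheRoads_alt
  obtain ⟨hnd, hlt⟩ := lotr_edges_inv rr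
  have hdA : lotrDict rr = PySem.Dict.mk ((lotrEdges rr).items.map lotrG) := lotr_dict_rel rr
  have hkeysA : (lotrDict rr).keys = (lotrEdges rr).keys := by
    rw [hdA]
    simp [PySem.Dict.keys, lotrG]
  have hndA : (lotrDict rr).keys.Nodup := hkeysA ▸ hnd
  have hgetA : ∀ p ∈ (lotrEdges rr).items, (lotrDict rr).getD p.1 [] = [p.2.1, p.2.2] := by
    intro p hp
    have hmem : (p.1, [p.2.1, p.2.2]) ∈ (lotrDict rr).items := by
      rw [hdA]
      exact List.mem_map.2 ⟨p, hp, rfl⟩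
    exact PySem.Dict.getD_of_mem_items _ hmem hndA []
  have hne : ∀ j ∈ (lotrDict rr).keys, (lotrDict rr).getD j [] ≠ [] := by
    intro j hj
    rw [hkeysA] at hj
    obtain ⟨p, hp, rfl⟩ := List.mem_map.1 hj
    rw [hgetA p hp]
    simp
  rw [lotr_phase2 _ hne, PySem.List.foldl_append_singleton_eq_map, List.nil_append, hkeysA]
  have hK : (lotrEdges rr).keys = (lotrEdges rr).items.map (fun p => p.1) := rfl
  have hEv : (lotrEdges rr).values = (lotrEdges rr).items.map (fun p => p.2) := rfl
  have hKlen : (lotrEdges rr).keys.length = (lotrEdges rr).items.length := by simp [hK]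
  have hElen : (lotrEdges rr).values.length = (lotrEdges rr).items.length := by simp [hEv]
  apply List.ext_getElem
  · simp [hKlen, hElen, PySem.List.length_enumerate]
  intro x hx1 hx2
  simp only [List.getElem_map, PySem.List.getElem_enumerate]
  rw [lotr_row_eq_map]
  have hxI : x < (lotrEdges rr).items.length := by
    simpa [PySem.List.length_enumerate, hElen] using hx2
  have hxE : x < (lotrEdges rr).values.length := by omega
  have hxK : x < (lotrEdges rr).keys.length := by omega
  -- the bucket list for row x
  have h0 : ∀ z ∈ ((lotrBuckets (lotrIncs (lotrEdges rr).values)).getD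
        ((lotrEdges rr).values[x]'hxE).1 [] ++
      (lotrBuckets (lotrIncs (lotrEdges rr).values)).getD
        ((lotrEdges rr).values[x]'hxE).2 []), 0 ≤ z := by
    intro z hz
    rcases List.mem_append.1 hz with hz | hz <;>
    · obtain ⟨k, hk, _, hkz⟩ := (lotr_bucket_mem _ _ _).1 hz
      omega
  have hfun : (fun (row : List Bool) (y : Int) =>
        if y ≠ 0 + (x : Int) then PySem.List.pySetD row y true else row)
      = (fun (row : List Bool) (y : Int) =>
        if (fun z => decide (z ≠ 0 + (x : Int))) y = true then PySem.List.pySetD row y true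
        else row) := by
    funext row z
    by_cases h : z ≠ 0 + (x : Int)
    · simp [h]
    · simp [if_neg h]
  rw [hfun]
  apply List.ext_getElem
  · rw [lotr_mark_length]
    simp [hkeysA, hKlen, hElen]
  intro y hy1 hy2
  have hyI : y < (lotrEdges rr).items.length := by
    rw [lotr_mark_length] at hy2
    simpa [hElen] using hy2
  have hyE : y < (lotrEdges rr).values.length := by omega
  have hyK : y < (lotrEdges rr).keys.length := by omega
  have hcell := lotr_mark_getElem?
      (((lotrBuckets (lotrIncs (lotrEdges rr).values)).getD
          ((lotrEdges rr).values[x]'hxE).1 []) ++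
        ((lotrBuckets (lotrIncs (lotrEdges rr).values)).getD
          ((lotrEdges rr).values[x]'hxE).2 []))
      (fun z => decide (z ≠ 0 + (x : Int)))
      (List.replicate (lotrEdges rr).values.length false) h0 y
  rw [List.getElem?_replicate, if_pos (by omega : y < (lotrEdges rr).values.length)] at hcell
  conv_lhs => rw [List.getElem_map]
  rw [List.getElem_of_eq hkeysA]
  show (if (lotrEdges rr).keys[x]'hxK = (lotrEdges rr).keys[y]'hyK then false
      else lotrShare ((lotrDict rr).getD ((lotrEdges rr).keys[x]'hxK) [])
        ((lotrDict rr).getD ((lotrEdges rr).keys[y]'hyK) [])) = _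
  apply Eq.symm
  rw [List.getElem_eq_iff, hcell]
  simp only [Option.map_some, Option.some.injEq, Bool.false_or]
  rw [lotr_any_mem]
  have hkx : (lotrEdges rr).keys[x]'hxK = ((lotrEdges rr).items[x]'hxI).1 := by simp [hK]
  have hky : (lotrEdges rr).keys[y]'hyK = ((lotrEdges rr).items[y]'hyI).1 := by simp [hK]
  have hvx : (lotrEdges rr).values[x]'hxE = ((lotrEdges rr).items[x]'hxI).2 := by simp [hEv]
  have hvy : (lotrEdges rr).values[y]'hyE = ((lotrEdges rr).items[y]'hyI).2 := by simp [hEv]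
  have hgx : (lotrDict rr).getD ((lotrEdges rr).items[x]'hxI).1 []
      = [((lotrEdges rr).items[x]'hxI).2.1, ((lotrEdges rr).items[x]'hxI).2.2] :=
    hgetA _ (List.getElem_mem hxI)
  have hgy : (lotrDict rr).getD ((lotrEdges rr).items[y]'hyI).1 []
      = [((lotrEdges rr).items[y]'hyI).2.1, ((lotrEdges rr).items[y]'hyI).2.2] :=
    hgetA _ (List.getElem_mem hyI)
  have hmemiff : ((y : Int) ∈ ((lotrBuckets (lotrIncs (lotrEdges rr).values)).getD
          ((lotrEdges rr).values[x]'hxE).1 [] ++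
        (lotrBuckets (lotrIncs (lotrEdges rr).values)).getD
          ((lotrEdges rr).values[x]'hxE).2 []))
      ↔ ((((lotrEdges rr).items[y]'hyI).2.1 = ((lotrEdges rr).items[x]'hxI).2.1 ∨
            ((lotrEdges rr).items[y]'hyI).2.2 = ((lotrEdges rr).items[x]'hxI).2.1) ∨
          (((lotrEdges rr).items[y]'hyI).2.1 = ((lotrEdges rr).items[x]'hxI).2.2 ∨
            ((lotrEdges rr).items[y]'hyI).2.2 = ((lotrEdges rr).items[x]'hxI).2.2)) := by
    rw [List.mem_append, lotr_bucket_mem, lotr_bucket_mem]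
    constructor
    · rintro (⟨k, hk, hor, hky'⟩ | ⟨k, hk, hor, hky'⟩) <;>
        (have hkey : k = y := by omega) <;> subst hkey
      · exact Or.inl (by rwa [hvx, hvy] at hor)
      · exact Or.inr (by rwa [hvx, hvy] at hor)
    · rintro (hor | hor)
      · exact Or.inl ⟨y, by omega, by rwa [hvx, hvy], rfl⟩
      · exact Or.inr ⟨y, by omega, by rwa [hvx, hvy], rfl⟩
  rw [hkx, hky, hgx, hgy]
  by_cases hxy : x = y
  · subst hxy
    rw [if_pos rfl]
    simp
  · have hk_ne : ((lotrEdges rr).items[x]'hxI).1 ≠ ((lotrEdges rr).items[y]'hyI).1 := by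
      intro h
      exact hxy ((hnd.getElem_inj_iff).1 (by rw [hkx, hky]; exact h))
    rw [if_neg hk_ne, lotr_share_iff]
    have hyx : (decide ((y : Int) ≠ 0 + (x : Int))) = true := decide_eq_true (by omega)
    rw [hyx, Bool.and_true, decide_eq_decide, hmemiff]
    omega
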